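-- pv_equiv track=rewrite | github.com/Andera-AI/xlcalculator | xlcalculator/utils.py | _sanitize_table_column_name
-- ===== SOURCE A (Python) =====
-- def _sanitize_table_column_name(column_name: str) -> str:
--     """
--     Remove escape characters ' from the column name
--     """
--     special_chars = ['[', ']', "'", '#', '@']
--     new_column_name = ""
--     for i in range(0, len(column_name)):
--         if column_name[i] == "'":
--             if i < len(column_name) - 1 and column_name[i+1] in special_chars:
--                 continue
--         new_column_name += column_name[i]
--     return new_column_name
-- ===== SOURCE B (Python) =====
-- def _sanitize_table_column_name(column_name: str) -> str:
--     """
--     Remove escape characters ' from the column name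
--     """
--     parts = []
--     i = 0
--     n = len(column_name)
--     while i < n:
--         if column_name[i] == "'":
--             j = i
--             while j < n and column_name[j] == "'":
--                 j += 1
--             # a maximal run of quotes: every quote but the last precedes a quote
--             # (a special char) and is dropped; the run collapses to nothing if
--             # followed by another special char, else to a single quote
--             if not (j < n and column_name[j] in "[]#@"):
--                 parts.append("'")
--             i = j
--         else:
--             parts.append(column_name[i])
--             i += 1
--     return "".join(parts)
-- ===== Notes on version B (the rewrite author's own statement) =====
-- stated objective: alternative
-- what changed: Replaces A's per-character index loop with one-char lookahead by a run-based scan: each maximal run of quotes is collapsed wholesale (dropped entirely if followed by one of []#@, else reduced to a single quote), with all other characters copied through.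
import Mathlib
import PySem

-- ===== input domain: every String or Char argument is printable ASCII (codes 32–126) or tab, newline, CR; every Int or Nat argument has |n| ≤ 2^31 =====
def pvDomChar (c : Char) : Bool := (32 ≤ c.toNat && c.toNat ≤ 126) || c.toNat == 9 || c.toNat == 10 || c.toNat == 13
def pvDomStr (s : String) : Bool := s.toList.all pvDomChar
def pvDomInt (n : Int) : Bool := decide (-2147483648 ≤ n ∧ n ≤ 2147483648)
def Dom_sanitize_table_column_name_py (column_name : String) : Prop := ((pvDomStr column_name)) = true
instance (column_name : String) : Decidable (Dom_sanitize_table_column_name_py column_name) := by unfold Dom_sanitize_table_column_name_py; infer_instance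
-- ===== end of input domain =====

-- B replaces A's per-character lookahead loop by a run-based scan collapsing each maximal quote run at once (alternative decomposition); the return values are proved equal.

-- ===== PORT A =====
-- literal port of A's index loop: for i in range(0, len(s)): skip s[i] if it is a quote followed by a special char, else append it
-- (indexing uses PySem.List.pyGetD — both accesses are guarded in range, so Python never raises here)
def sanitize_table_column_name_py (column_name : String) : String :=
  let special_chars : List Char := ['[', ']', '\'', '#', '@']
  let cs : List Char := column_name.toList
  let n : Int := PySem.Chars.len cs
  String.ofList ((PySem.List.pyRange 0 n 1).foldl (fun acc i =>
    let c := PySem.List.pyGetD cs i ' '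
    if c == '\'' && (decide (i < n - 1) && special_chars.contains (PySem.List.pyGetD cs (i + 1) ' ')) then
      acc
    else acc ++ [c]) [])

-- ===== PORT B =====
-- port of Source B: the run's tail scan (inner while) becomes dropWhile; the collapsed
-- contribution of a quote run, as in Source B's if/append
def pvAltFront (rest' : List Char) : List Char :=
  match rest'.head? with
  | some d => if "[]#@".toList.contains d then [] else ['\'']
  | none => ['\'']

-- Source B's outer while loop over run starts, as structural recursion
def pvAltGo : List Char → List Char
  | [] => []
  | c :: rest =>
    if c = '\'' then
      pvAltFront (rest.dropWhile (fun x => x = '\'')) ++ pvAltGo (rest.dropWhile (fun x => x = '\''))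
    else
      c :: pvAltGo rest
termination_by cs => cs.length
decreasing_by
  · simpa using Nat.lt_succ_of_le (List.length_dropWhile_le _ _)
  · simp

def sanitize_table_column_name_py_alt (column_name : String) : String :=
  String.ofList (pvAltGo column_name.toList)

-- ===== PRECONDITION & SPEC =====
def Spec_sanitize_table_column_name_py (column_name : String) (out : String) : Prop := out = sanitize_table_column_name_py_alt column_name
instance (column_name : String) (out : String) : Decidable (Spec_sanitize_table_column_name_py column_name out) := by unfold Spec_sanitize_table_column_name_py; infer_instance

-- ===== CLAIM (what is proved, stated in full; the proofs are below) =====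
def Claim_equal_sanitize_table_column_name_py : Prop := ∀ (column_name : String), Dom_sanitize_table_column_name_py column_name → Spec_sanitize_table_column_name_py column_name (sanitize_table_column_name_py column_name)

-- ===== LEMMAS AND PROOFS =====

-- common recursive description of the result: keep a char unless it is a quote whose successor is special
def pvKeep : List Char → List Char
  | [] => []
  | c :: rest =>
    (if c = '\'' ∧ rest.headD ' ' ∈ (['[', ']', '\'', '#', '@'] : List Char) then [] else [c]) ++ pvKeep rest

-- the Nat-indexed skip condition of A's loop
def pvBadA (cs : List Char) (k : Nat) : Bool :=
  (cs.getD k ' ') == '\'' && (decide ((k : Int) < (cs.length : Int) - 1) &&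
    (['[', ']', '\'', '#', '@'] : List Char).contains (cs.getD (k + 1) ' '))

lemma pvBadA_head (c : Char) (rest : List Char) :
    pvBadA (c :: rest) 0
      = decide (c = '\'' ∧ rest.headD ' ' ∈ (['[', ']', '\'', '#', '@'] : List Char)) := by
  unfold pvBadA
  cases rest with
  | nil => simp
  | cons d rs =>
    rw [Bool.eq_iff_iff]
    simp [List.contains_eq_mem]

lemma pvBadA_succ (c : Char) (rest : List Char) (k : Nat) :
    pvBadA (c :: rest) (k + 1) = pvBadA rest k := by
  unfold pvBadA
  simp only [List.getD_cons_succ, List.length_cons]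
  congr 2
  rw [decide_eq_decide]
  push_cast
  omega

-- A's filtered index range maps to pvKeep
lemma pvA_filter_eq_keep (cs : List Char) :
    ((List.range cs.length).filter (fun k => !pvBadA cs k)).map (fun k => cs.getD k ' ') = pvKeep cs := by
  induction cs with
  | nil => simp [pvKeep]
  | cons c rest ih =>
    rw [List.length_cons, List.range_succ_eq_map, List.filter_cons, List.filter_map]
    have hcomp : ((fun k => !pvBadA (c :: rest) k) ∘ Nat.succ) = fun k => !pvBadA rest k := by
      funext k
      simp [Function.comp, Nat.succ_eq_add_one, pvBadA_succ]
    have hmap : ((fun k => (c :: rest).getD k ' ') ∘ Nat.succ) = fun k => rest.getD k ' ' := by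
      funext k; simp [Function.comp]
    rw [hcomp, pvKeep]
    by_cases h : c = '\'' ∧ rest.headD ' ' ∈ (['[', ']', '\'', '#', '@'] : List Char)
    · have hb : (!pvBadA (c :: rest) 0) = false := by
        rw [pvBadA_head, decide_eq_true h]; rfl
      rw [hb, if_neg (by simp), List.map_map, hmap, ih, if_pos h, List.nil_append]
    · have hb : (!pvBadA (c :: rest) 0) = true := by
        rw [pvBadA_head, decide_eq_false h]; rfl
      rw [hb, if_pos rfl, List.map_cons, List.map_map, hmap, ih, if_neg h,
        List.getD_cons_zero, List.singleton_append]

-- A's foldl over range(0, len) computes pvKeep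
lemma pvA_eq_keep (cs : List Char) :
    (PySem.List.pyRange 0 (PySem.Chars.len cs) 1).foldl (fun acc i =>
      let c := PySem.List.pyGetD cs i ' '
      if c == '\'' && (decide (i < (PySem.Chars.len cs) - 1) &&
          (['[', ']', '\'', '#', '@'] : List Char).contains (PySem.List.pyGetD cs (i + 1) ' ')) then
        acc
      else acc ++ [c]) [] = pvKeep cs := by
  rw [PySem.Chars.len_eq, PySem.List.pyRange_zero_natCast, List.foldl_map]
  rw [PySem.List.foldl_congr_mem _ _
      (fun acc k => if !pvBadA cs k then acc ++ [cs.getD k ' '] else acc) _ ?_]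
  · rw [PySem.List.foldl_append_if]
    simpa using pvA_filter_eq_keep cs
  · intro acc k _
    have h1 : PySem.List.pyGetD cs ((k : Int)) ' ' = cs.getD k ' ' := PySem.List.pyGetD_natCast cs k ' '
    have h2 : PySem.List.pyGetD cs ((k : Int) + 1) ' ' = cs.getD (k + 1) ' ' := by
      have := PySem.List.pyGetD_natCast cs (k + 1) ' '
      push_cast at this
      exact this
    simp only [h1, h2]
    rw [show ((cs.getD k ' ') == '\'' && (decide ((k : Int) < (cs.length : Int) - 1) &&
        (['[', ']', '\'', '#', '@'] : List Char).contains (cs.getD (k + 1) ' '))) = pvBadA cs k from rfl]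
    cases pvBadA cs k <;> simp

-- pvKeep collapses a quote run exactly as pvAltFront does
lemma pvKeep_quote_run (rest : List Char) :
    pvKeep ('\'' :: rest)
      = pvAltFront (rest.dropWhile (fun x => x = '\''))
        ++ pvKeep (rest.dropWhile (fun x => x = '\'')) := by
  induction rest with
  | nil => simp [pvKeep, pvAltFront]
  | cons d rs ih =>
    by_cases hd : d = '\''
    · subst hd
      rw [show ('\''::rs).dropWhile (fun x => x = '\'') = rs.dropWhile (fun x => x = '\'') by
            simp [List.dropWhile]]
      rw [pvKeep, if_pos (by simp), List.nil_append, ih]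
    · rw [show (d::rs).dropWhile (fun x => x = '\'') = d :: rs by
            simp [List.dropWhile, hd]]
      rw [pvKeep, List.headD_cons]
      by_cases hmem : d ∈ (['[', ']', '#', '@'] : List Char)
      · simp only [List.mem_cons, List.not_mem_nil, or_false] at hmem
        rcases hmem with h | h | h | h <;> subst h <;> simp [pvAltFront]
      · simp only [List.mem_cons, List.not_mem_nil, or_false] at hmem
        push Not at hmem
        obtain ⟨e1, e2, e3, e4⟩ := hmem
        simp [pvAltFront, hd, e1, e2, e3, e4]

-- B's run-based scan computes pvKeep
lemma pvAlt_eq_keep (cs : List Char) : pvAltGo cs = pvKeep cs := by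
  induction cs using pvAltGo.induct with
  | case1 => simp [pvAltGo, pvKeep]
  | case2 rest ih =>
    rw [pvAltGo, if_pos rfl, ih, pvKeep_quote_run]
  | case3 c rest hq ih =>
    rw [pvAltGo, if_neg hq, ih, pvKeep, if_neg (by rintro ⟨h, -⟩; exact hq h),
      List.singleton_append]

-- ===== VERDICT (by name: the statement is the Claim_ definition above) =====
theorem sanitize_table_column_name_py_spec : Claim_equal_sanitize_table_column_name_py := by
  intro s _
  unfold Spec_sanitize_table_column_name_py sanitize_table_column_name_py sanitize_table_column_name_py_alt
  simp only []
  rw [pvAlt_eq_keep, pvA_eq_keep]
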